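-- pv_equiv track=rewrite | github.com/wfeng1991/learnpy | py/leetcode/209.py | minSubArrayLen1
-- ===== SOURCE A (Python) =====
-- def minSubArrayLen1(s, nums):
--     """
--     :type s: int
--     :type nums: List[int]
--     :rtype: int
--     """
--     if sum(nums) < s:
--         return 0
--     l=len(nums)
--     sz=l
--     for i in range(l):
--         j=i
--         sm=0
--         while j<l:
--             sm+=nums[j]
--             j+=1
--             if sm>=s:
--                 sz=min(j-i,sz)
--                 if sz==1:
--                     return sz
--                 break
--     return sz
-- ===== SOURCE B (Python) =====
-- def minSubArrayLen1(s, nums):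
--     """
--     :type s: int
--     :type nums: List[int]
--     :rtype: int
--     """
--     if sum(nums) < s:
--         return 0
--     P = [0]
--     for x in nums:
--         P.append(P[-1] + x)
--     l = len(nums)
--     best = l
--     for j in range(1, l + 1):
--         t = P[j] - s
--         # only starts i with j - i < best can improve; scan them backwards
--         for i in range(j - 1, max(j - best, -1), -1):
--             if P[i] <= t:
--                 best = min(best, j - i)
--                 break
--     return best
-- ===== Notes on version B (the rewrite author's own statement) =====
-- stated objective: alternative
-- what changed: B precomputes a prefix-sum table and, for each window END index, scans start indices backwards to the nearest qualifying start, instead of A's per-START incremental summation with break/early-return; both are exact even with negative numbers.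
import Mathlib
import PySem

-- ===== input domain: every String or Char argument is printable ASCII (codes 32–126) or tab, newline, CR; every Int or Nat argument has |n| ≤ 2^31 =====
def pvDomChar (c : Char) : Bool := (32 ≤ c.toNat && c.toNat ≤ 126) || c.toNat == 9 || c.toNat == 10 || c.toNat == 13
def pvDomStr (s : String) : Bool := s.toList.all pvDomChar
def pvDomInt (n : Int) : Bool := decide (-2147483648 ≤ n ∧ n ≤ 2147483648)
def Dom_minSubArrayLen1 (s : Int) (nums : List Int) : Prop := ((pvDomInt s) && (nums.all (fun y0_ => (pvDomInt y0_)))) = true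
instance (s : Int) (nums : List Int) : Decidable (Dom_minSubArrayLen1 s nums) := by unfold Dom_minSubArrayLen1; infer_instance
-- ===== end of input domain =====

-- B replaces A's per-start incremental summation (with break and early return) by a prefix-sum
-- table scanned per END index backwards to the nearest qualifying start; alternative, same cost.

-- ===== PORT A =====
-- inner `while j < l` loop of A; fuel = (l - j).toNat, so fuel > 0 ↔ j < l.
-- Returns (sz, earlyReturn?): earlyReturn true models Python's `return sz` when sz == 1.
-- nums[j] is always in range here (0 ≤ j < l = len nums), so pyGetD's default is never read.
def aInner (s : Int) (nums : List Int) (i : Int) : Int → Int → Int → Nat → Int × Bool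
  | _, _, sz, 0 => (sz, false)            -- loop condition j < l fails
  | j, sm, sz, fuel + 1 =>
    let sm' := sm + PySem.List.pyGetD nums j 0
    let j' := j + 1
    if s ≤ sm' then
      let sz' := min (j' - i) sz
      if sz' = 1 then (sz', true) else (sz', false)   -- return sz / break
    else aInner s nums i j' sm' sz fuel
-- outer `for i in range(l)` loop with possible early return from the body
def aOuter (s : Int) (nums : List Int) (l : Int) : Int → List Int → Int
  | sz, [] => sz
  | sz, i :: rest =>
    let r := aInner s nums i i 0 sz (l - i).toNat
    if r.2 then r.1 else aOuter s nums l r.1 rest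

def minSubArrayLen1 (s : Int) (nums : List Int) : Int :=
  if nums.sum < s then 0
  else
    let l : Int := nums.length
    aOuter s nums l l (PySem.List.pyRange 0 l 1)

-- ===== PORT B =====
-- P = [0]; for x in nums: P.append(P[-1] + x)
def bPrefix (nums : List Int) : List Int :=
  nums.foldl (fun acc x => acc ++ [acc.getLast! + x]) [0]
-- `for i in range(j-1, stop, -1): if P[i] <= t: … break` — first qualifying start, scanned backwards
def bInner (P : List Int) (t j : Int) : List Int → Option Int
  | [] => none
  | i :: rest =>
    if PySem.List.pyGetD P i 0 ≤ t then some (j - i) else bInner P t j rest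
-- `for j in range(1, l+1)` loop
def bOuter (s : Int) (P : List Int) : Int → List Int → Int
  | best, [] => best
  | best, j :: rest =>
    let t := PySem.List.pyGetD P j 0 - s
    let best' :=
      -- only starts i with j - i < best can improve; scan them backwards
      match bInner P t j (PySem.List.pyRange (j - 1) (max (j - best) (-1)) (-1)) with
      | some len => min best len
      | none => best
    bOuter s P best' rest

def minSubArrayLen1_alt (s : Int) (nums : List Int) : Int :=
  if nums.sum < s then 0
  else
    let P := bPrefix nums
    let l : Int := nums.length
    bOuter s P l (PySem.List.pyRange 1 (l + 1) 1)

-- ===== PRECONDITION & SPEC =====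
def Spec_minSubArrayLen1 (s : Int) (nums : List Int) (out : Int) : Prop := out = minSubArrayLen1_alt s nums
instance (s : Int) (nums : List Int) (out : Int) : Decidable (Spec_minSubArrayLen1 s nums out) := by unfold Spec_minSubArrayLen1; infer_instance

-- ===== CLAIM (what is proved, stated in full; the proofs are below) =====
def Claim_equal_minSubArrayLen1 : Prop := ∀ (s : Int) (nums : List Int), Dom_minSubArrayLen1 s nums → Spec_minSubArrayLen1 s nums (minSubArrayLen1 s nums)

-- ===== LEMMAS AND PROOFS =====

-- prefix sum of the first j elements (j an Int index, 0 ≤ j ≤ len nums in all uses)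
def pvPref (nums : List Int) (j : Int) : Int := (nums.take j.toNat).sum

-- the common fold step: over a candidate pair (i, j), take the window length if the window qualifies
def pvStep (s : Int) (pr : Int → Int) (acc : Int) (p : Int × Int) : Int :=
  if s ≤ pr p.2 - pr p.1 then min acc (p.2 - p.1) else acc

-- row-major and column-major enumerations of all pairs 0 ≤ i < j ≤ l
def pvRows (l : Int) : List (Int × Int) :=
  (PySem.List.pyRange 0 l 1).flatMap (fun i => (PySem.List.pyRange (i + 1) (l + 1) 1).map (fun j => (i, j)))
def pvCols (l : Int) : List (Int × Int) :=
  (PySem.List.pyRange 1 (l + 1) 1).flatMap (fun j => (PySem.List.pyRange (j - 1) (-1) (-1)).map (fun i => (i, j)))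

theorem pvStep_absorb (s : Int) (pr : Int → Int) :
    ∀ (L : List (Int × Int)) (acc : Int), (∀ p ∈ L, acc ≤ p.2 - p.1) →
    L.foldl (pvStep s pr) acc = acc := by
  intro L
  induction L with
  | nil => intro acc _; rfl
  | cons p rest ih =>
    intro acc h
    have hp := h p (by simp)
    simp only [List.foldl_cons, pvStep]
    split_ifs with hq
    · rw [min_eq_left hp]
      exact ih acc (fun q hq => h q (by simp [hq]))
    · exact ih acc (fun q hq => h q (by simp [hq]))

theorem pvStep_ge_one (s : Int) (pr : Int → Int) :
    ∀ (L : List (Int × Int)) (acc : Int), 1 ≤ acc → (∀ p ∈ L, 1 ≤ p.2 - p.1) →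
    1 ≤ L.foldl (pvStep s pr) acc := by
  intro L
  induction L with
  | nil => intro acc h _; exact h
  | cons p rest ih =>
    intro acc h hall
    have hp := hall p (by simp)
    simp only [List.foldl_cons, pvStep]
    split_ifs with hq
    · exact ih _ (le_min h hp) (fun q hq => hall q (by simp [hq]))
    · exact ih _ h (fun q hq => hall q (by simp [hq]))

theorem pvPref_succ (nums : List Int) (j : Int) (h0 : 0 ≤ j) (h1 : j < nums.length) :
    pvPref nums (j + 1) = pvPref nums j + PySem.List.pyGetD nums j 0 := by
  unfold pvPref
  have hjn : j.toNat < nums.length := by omega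
  have hj1 : (j + 1).toNat = j.toNat + 1 := by omega
  rw [hj1, List.take_add_one, List.sum_append]
  have : nums[j.toNat]? = some nums[j.toNat] := List.getElem?_eq_getElem hjn
  rw [this]
  have hget : PySem.List.pyGetD nums j 0 = nums[j.toNat] := by
    rw [PySem.List.pyGetD_eq_getElem nums 0 h0 (by exact_mod_cast h1)]
  simp [hget]

theorem aInner_eq (s : Int) (nums : List Int) (i : Int) (hi : 0 ≤ i) :
    ∀ (fuel : Nat) (j sm sz : Int), i ≤ j → j ≤ nums.length → fuel = ((nums.length : Int) - j).toNat →
    sm = pvPref nums j - pvPref nums i →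
    (aInner s nums i j sm sz fuel).1 =
      ((PySem.List.pyRange (j + 1) ((nums.length : Int) + 1) 1).map (fun j' => (i, j'))).foldl
        (pvStep s (pvPref nums)) sz
    ∧ ((aInner s nums i j sm sz fuel).2 = true → (aInner s nums i j sm sz fuel).1 = 1) := by
  intro fuel
  induction fuel with
  | zero =>
    intro j sm sz hij hjl hfuel hsm
    have hj : j = (nums.length : Int) := by omega
    subst hj
    rw [PySem.List.pyRange_one_eq_nil (by omega)]
    simp [aInner]
  | succ fuel ih =>
    intro j sm sz hij hjl hfuel hsm
    have hjlt : j < (nums.length : Int) := by omega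
    have key : pvPref nums (j + 1) - pvPref nums i = sm + PySem.List.pyGetD nums j 0 := by
      rw [pvPref_succ nums j (by omega) (by exact_mod_cast hjlt)]; omega
    rw [PySem.List.pyRange_one_cons (show j + 1 < (nums.length : Int) + 1 by omega)]
    simp only [List.map_cons, List.foldl_cons]
    have habs : ∀ acc : Int, acc ≤ j + 1 - i →
        ((PySem.List.pyRange (j + 1 + 1) ((nums.length : Int) + 1) 1).map
          (fun j' => (i, j'))).foldl (pvStep s (pvPref nums)) acc = acc := by
      intro acc hacc
      apply pvStep_absorb
      intro p hp
      obtain ⟨j'', hj'', rfl⟩ := List.mem_map.mp hp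
      rw [PySem.List.mem_pyRange_one] at hj''
      simp only
      omega
    by_cases hq : s ≤ sm + PySem.List.pyGetD nums j 0
    · have hstep : pvStep s (pvPref nums) sz (i, j + 1) = min (j + 1 - i) sz := by
        simp only [pvStep]
        rw [key, if_pos hq, min_comm]
      rw [hstep]
      by_cases h1 : min (j + 1 - i) sz = 1
      · have : aInner s nums i j sm sz (fuel + 1) = (1, true) := by
          simp [aInner, if_pos hq, h1]
        rw [this, h1, habs 1 (by omega)]
        exact ⟨rfl, fun _ => rfl⟩
      · have : aInner s nums i j sm sz (fuel + 1) = (min (j + 1 - i) sz, false) := by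
          simp only [aInner, if_pos hq, if_neg h1]
        rw [this, habs _ (min_le_left _ _)]
        exact ⟨rfl, by simp⟩
    · have : aInner s nums i j sm sz (fuel + 1) =
          aInner s nums i (j + 1) (sm + PySem.List.pyGetD nums j 0) sz fuel := by
        simp only [aInner, if_neg hq]
      rw [this]
      have hstep : pvStep s (pvPref nums) sz (i, j + 1) = sz := by
        simp only [pvStep]
        rw [key, if_neg hq]
      rw [hstep]
      exact ih (j + 1) (sm + PySem.List.pyGetD nums j 0) sz (by omega) (by omega) (by omega) (by omega)

theorem aOuter_eq (s : Int) (nums : List Int) :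
    ∀ (is : List Int) (sz : Int), (∀ i ∈ is, 0 ≤ i ∧ i < (nums.length : Int)) → 1 ≤ sz →
    aOuter s nums (nums.length : Int) sz is =
      (is.flatMap (fun i => (PySem.List.pyRange (i + 1) ((nums.length : Int) + 1) 1).map (fun j => (i, j)))).foldl
        (pvStep s (pvPref nums)) sz := by
  intro is
  induction is with
  | nil => intro sz _ _; rfl
  | cons i rest ih =>
    intro sz hmem hsz
    have hi := hmem i (by simp)
    obtain ⟨hA, hB⟩ := aInner_eq s nums i hi.1 ((nums.length : Int) - i).toNat i 0 sz le_rfl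
      (by omega) rfl (by simp)
    simp only [aOuter, List.flatMap_cons, List.foldl_append]
    have hrow1 : 1 ≤ (aInner s nums i i 0 sz ((nums.length : Int) - i).toNat).1 := by
      rw [hA]
      apply pvStep_ge_one s (pvPref nums) _ sz hsz
      intro p hp
      obtain ⟨j', hj', rfl⟩ := List.mem_map.mp hp
      rw [PySem.List.mem_pyRange_one] at hj'
      simp only
      omega
    by_cases hflag : (aInner s nums i i 0 sz ((nums.length : Int) - i).toNat).2 = true
    · rw [if_pos hflag]
      rw [← hA, hB hflag]
      symm
      apply pvStep_absorb
      intro p hp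
      obtain ⟨i', hi', hq⟩ := List.mem_flatMap.mp hp
      obtain ⟨j', hj', rfl⟩ := List.mem_map.mp hq
      rw [PySem.List.mem_pyRange_one] at hj'
      simp only
      omega
    · rw [if_neg hflag, ← hA]
      exact ih _ (fun i' hi' => hmem i' (by simp [hi'])) hrow1

-- running prefix sums starting from c (proof-side view of bPrefix's append loop)
def pvScan (c : Int) : List Int → List Int
  | [] => []
  | x :: r => (c + x) :: pvScan (c + x) r

theorem pvScan_length (c : Int) (xs : List Int) : (pvScan c xs).length = xs.length := by
  induction xs generalizing c with
  | nil => rfl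
  | cons x r ih => simp [pvScan, ih]

theorem pvScan_getElem : ∀ (xs : List Int) (c : Int) (k : Nat) (h : k < xs.length),
    (pvScan c xs)[k]'(by rw [pvScan_length]; exact h) = c + (xs.take (k + 1)).sum := by
  intro xs
  induction xs with
  | nil => intro c k h; simp at h
  | cons x r ih =>
    intro c k h
    cases k with
    | zero => simp [pvScan]
    | succ k =>
      have := ih (c + x) k (by simpa using h)
      simp only [pvScan, List.getElem_cons_succ, this, List.take_succ_cons, List.sum_cons]
      ring

theorem bPrefix_foldl : ∀ (xs acc : List Int) (c : Int), acc.getLast! = c →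
    xs.foldl (fun a x => a ++ [a.getLast! + x]) acc = acc ++ pvScan c xs := by
  intro xs
  induction xs with
  | nil => intro acc c _; simp [pvScan]
  | cons x r ih =>
    intro acc c hc
    simp only [List.foldl_cons, hc]
    rw [ih (acc ++ [c + x]) (c + x) (by simp), pvScan]
    simp

theorem bPrefix_get (nums : List Int) (j : Int) (h0 : 0 ≤ j) (h1 : j ≤ nums.length) :
    PySem.List.pyGetD (bPrefix nums) j 0 = pvPref nums j := by
  have hb : bPrefix nums = 0 :: pvScan 0 nums := by
    unfold bPrefix
    rw [bPrefix_foldl nums [0] 0 rfl]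
    rfl
  rw [hb, PySem.List.pyGetD_of_nonneg _ 0 h0]
  rcases Nat.eq_zero_or_eq_succ_pred j.toNat with h | h
  · rw [h]
    simp [pvPref, h]
  · rw [h, List.getD_cons_succ,
      List.getD_eq_getElem _ _ (by rw [pvScan_length]; omega),
      pvScan_getElem nums 0 _ (by omega)]
    unfold pvPref
    rw [show j.toNat.pred + 1 = j.toNat by omega]
    omega

theorem bInner_eq (s : Int) (nums : List Int) (j : Int) (_hj1 : 1 ≤ j) (hj2 : j ≤ nums.length) :
    ∀ (kf : Nat) (k m best : Int), k ≤ j - 1 → -1 ≤ m → kf = (k - m).toNat →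
    (match bInner (bPrefix nums) (pvPref nums j - s) j (PySem.List.pyRange k m (-1)) with
      | some len => min best len
      | none => best) =
    ((PySem.List.pyRange k m (-1)).map (fun i => (i, j))).foldl (pvStep s (pvPref nums)) best := by
  intro kf
  induction kf with
  | zero =>
    intro k m best hk hm hkf
    rw [PySem.List.pyRange_neg_one_eq_nil (by omega)]
    rfl
  | succ kf ih =>
    intro k m best hk hm hkf
    have hk0 : 0 ≤ k := by omega
    rw [PySem.List.pyRange_neg_one_cons (by omega)]
    simp only [List.map_cons, List.foldl_cons, bInner]
    have hget : PySem.List.pyGetD (bPrefix nums) k 0 = pvPref nums k :=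
      bPrefix_get nums k hk0 (by omega)
    rw [hget]
    by_cases hq : pvPref nums k ≤ pvPref nums j - s
    · rw [if_pos hq]
      have hstep : pvStep s (pvPref nums) best (k, j) = min best (j - k) := by
        simp only [pvStep]
        rw [if_pos (by omega)]
      rw [hstep]
      symm
      apply pvStep_absorb
      intro p hp
      obtain ⟨i', hi', rfl⟩ := List.mem_map.mp hp
      rw [PySem.List.mem_pyRange_neg_one] at hi'
      simp only
      omega
    · rw [if_neg hq]
      have hstep : pvStep s (pvPref nums) best (k, j) = best := by
        simp only [pvStep]
        rw [if_neg (by omega)]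
      rw [hstep]
      exact ih (k - 1) m best (by omega) (by omega) (by omega)

theorem pvStep_le (s : Int) (pr : Int → Int) :
    ∀ (L : List (Int × Int)) (acc : Int), L.foldl (pvStep s pr) acc ≤ acc := by
  intro L
  induction L with
  | nil => intro acc; exact le_rfl
  | cons p rest ih =>
    intro acc
    simp only [List.foldl_cons, pvStep]
    split_ifs
    · exact le_trans (ih _) (min_le_left _ _)
    · exact ih acc

theorem bCol_eq (s : Int) (nums : List Int) (j : Int) (hj1 : 1 ≤ j) (hj2 : j ≤ nums.length)
    (best : Int) (hb : 1 ≤ best) :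
    (match bInner (bPrefix nums) (pvPref nums j - s) j
        (PySem.List.pyRange (j - 1) (max (j - best) (-1)) (-1)) with
      | some len => min best len
      | none => best) =
    ((PySem.List.pyRange (j - 1) (-1) (-1)).map (fun i => (i, j))).foldl (pvStep s (pvPref nums)) best := by
  have hm1 : -1 ≤ max (j - best) (-1) := le_max_right _ _
  have hm2 : max (j - best) (-1) ≤ j - 1 := by
    rcases max_choice (j - best) (-1) with h | h <;> omega
  have hsplit : PySem.List.pyRange (j - 1) (-1) (-1) =
      PySem.List.pyRange (j - 1) (max (j - best) (-1)) (-1) ++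
      PySem.List.pyRange (max (j - best) (-1)) (-1) (-1) := by
    rw [PySem.List.pyRange_neg_one_eq_reverse, PySem.List.pyRange_neg_one_eq_reverse,
      PySem.List.pyRange_neg_one_eq_reverse, ← List.reverse_append,
      ← PySem.List.pyRange_one_append ((-1 : Int) + 1) (max (j - best) (-1) + 1) (j - 1 + 1)
        (by omega) (by omega)]
  rw [hsplit, List.map_append, List.foldl_append,
    bInner_eq s nums j hj1 hj2 ((j - 1) - max (j - best) (-1)).toNat (j - 1)
      (max (j - best) (-1)) best (by omega) hm1 rfl]
  symm
  apply pvStep_absorb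
  intro p hp
  obtain ⟨i, hi, rfl⟩ := List.mem_map.mp hp
  rw [PySem.List.mem_pyRange_neg_one] at hi
  have hle : ((PySem.List.pyRange (j - 1) (max (j - best) (-1)) (-1)).map
      (fun i => (i, j))).foldl (pvStep s (pvPref nums)) best ≤ best := pvStep_le _ _ _ _
  rcases max_choice (j - best) (-1) with h | h <;> rw [h] at hi <;> simp only <;> omega

theorem bOuter_eq (s : Int) (nums : List Int) :
    ∀ (js : List Int) (best : Int), (∀ j ∈ js, 1 ≤ j ∧ j ≤ (nums.length : Int)) → 1 ≤ best →
    bOuter s (bPrefix nums) best js =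
      (js.flatMap (fun j => (PySem.List.pyRange (j - 1) (-1) (-1)).map (fun i => (i, j)))).foldl
        (pvStep s (pvPref nums)) best := by
  intro js
  induction js with
  | nil => intro best _ _; rfl
  | cons j rest ih =>
    intro best hmem hb
    have hj := hmem j (by simp)
    simp only [bOuter, List.flatMap_cons, List.foldl_append]
    rw [bPrefix_get nums j (by omega) (by omega)]
    rw [bCol_eq s nums j hj.1 hj.2 best hb]
    refine ih _ (fun j' hj' => hmem j' (by simp [hj'])) ?_
    apply pvStep_ge_one s (pvPref nums) _ best hb
    intro p hp
    obtain ⟨i, hi, rfl⟩ := List.mem_map.mp hp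
    rw [PySem.List.mem_pyRange_neg_one] at hi
    simp only
    omega

theorem pvRows_perm_pvCols (l : Int) : (pvRows l).Perm (pvCols l) := by
  have hmemR : ∀ p : Int × Int, p ∈ pvRows l ↔ 0 ≤ p.1 ∧ p.1 < p.2 ∧ p.2 ≤ l := by
    intro p
    unfold pvRows
    rw [List.mem_flatMap]
    constructor
    · rintro ⟨i, hi, hp⟩
      obtain ⟨j, hj, rfl⟩ := List.mem_map.mp hp
      rw [PySem.List.mem_pyRange_one] at hi hj
      simp only
      omega
    · rintro ⟨h1, h2, h3⟩
      exact ⟨p.1, by rw [PySem.List.mem_pyRange_one]; omega,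
        List.mem_map.mpr ⟨p.2, by rw [PySem.List.mem_pyRange_one]; omega, rfl⟩⟩
  have hmemC : ∀ p : Int × Int, p ∈ pvCols l ↔ 0 ≤ p.1 ∧ p.1 < p.2 ∧ p.2 ≤ l := by
    intro p
    unfold pvCols
    rw [List.mem_flatMap]
    constructor
    · rintro ⟨j, hj, hp⟩
      obtain ⟨i, hi, rfl⟩ := List.mem_map.mp hp
      rw [PySem.List.mem_pyRange_one] at hj
      rw [PySem.List.mem_pyRange_neg_one] at hi
      simp only
      omega
    · rintro ⟨h1, h2, h3⟩
      exact ⟨p.2, by rw [PySem.List.mem_pyRange_one]; omega,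
        List.mem_map.mpr ⟨p.1, by rw [PySem.List.mem_pyRange_neg_one]; omega, rfl⟩⟩
  have hndR : (pvRows l).Nodup := by
    unfold pvRows
    rw [List.nodup_flatMap]
    constructor
    · intro i _
      exact (PySem.List.nodup_pyRange_one _ _).map (fun a b h => by injection h)
    · apply List.Pairwise.imp ?_ (PySem.List.pairwise_lt_pyRange_one _ _)
      intro a b hab p hpa hpb
      obtain ⟨j1, _, rfl⟩ := List.mem_map.mp hpa
      obtain ⟨j2, _, h⟩ := List.mem_map.mp hpb
      exact absurd (congrArg Prod.fst h) (by simp; omega)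
  have hndC : (pvCols l).Nodup := by
    unfold pvCols
    rw [List.nodup_flatMap]
    constructor
    · intro j _
      apply List.Nodup.map (fun a b h => by injection h)
      rw [PySem.List.pyRange_neg_one_eq_reverse, List.nodup_reverse]
      exact PySem.List.nodup_pyRange_one _ _
    · apply List.Pairwise.imp ?_ (PySem.List.pairwise_lt_pyRange_one _ _)
      intro a b hab p hpa hpb
      obtain ⟨i1, _, rfl⟩ := List.mem_map.mp hpa
      obtain ⟨i2, _, h⟩ := List.mem_map.mp hpb
      exact absurd (congrArg Prod.snd h) (by simp; omega)
  rw [List.perm_ext_iff_of_nodup hndR hndC]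
  intro p
  rw [hmemR, hmemC]

theorem pvStep_leftComm (s : Int) (pr : Int → Int) (acc : Int) (p q : Int × Int) :
    pvStep s pr (pvStep s pr acc p) q = pvStep s pr (pvStep s pr acc q) p := by
  unfold pvStep
  split_ifs <;> simp [min_comm, min_left_comm]

-- ===== VERDICT (by name: the statement is the Claim_ definition above) =====
theorem minSubArrayLen1_spec : Claim_equal_minSubArrayLen1 := by
  intro s nums _
  unfold Spec_minSubArrayLen1 minSubArrayLen1 minSubArrayLen1_alt
  by_cases hlt : nums.sum < s
  · rw [if_pos hlt, if_pos hlt]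
  · rw [if_neg hlt, if_neg hlt]
    rcases List.eq_nil_or_concat nums with h0 | ⟨_, _, h0⟩
    · subst h0
      simp [aOuter, bOuter, PySem.List.pyRange_one_eq_nil]
    · have hpos : 0 < nums.length := by subst h0; simp
      have h1 : 1 ≤ (nums.length : Int) := by exact_mod_cast hpos
      rw [aOuter_eq s nums (PySem.List.pyRange 0 (nums.length : Int) 1) (nums.length : Int)
        (fun i hi => by rw [PySem.List.mem_pyRange_one] at hi; omega) h1]
      rw [bOuter_eq s nums (PySem.List.pyRange 1 ((nums.length : Int) + 1) 1) (nums.length : Int)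
        (fun j hj => by rw [PySem.List.mem_pyRange_one] at hj; omega) h1]
      exact (pvRows_perm_pvCols (nums.length : Int)).foldl_eq'
        (fun x _ y _ z => pvStep_leftComm s (pvPref nums) z x y) _
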